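-- pv_equiv track=rewrite | github.com/AgileCloudInstitute/AgileCloudManager | controller/config_cliprocessor.py | countSingleSlashesInString
-- ===== SOURCE A (Python) =====
-- def countSingleSlashesInString(inputString):
--   singles = 0
--   idx = 0
--   for c in inputString:
--     if (idx > 0) and (idx < (len(inputString)-1)):
--       charBefore = inputString[idx-1]
--       charAfter = inputString[idx+1]
--       if c == "\\":
--         if (charBefore != "\\") and (charAfter != "\\"):
--           singles = singles + 1
--     idx = idx+1
--   return singles
-- ===== SOURCE B (Python) =====
-- def countSingleSlashesInString(inputString):
--   parts = inputString.split("\\")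
--   return sum(1 for left, right in zip(parts, parts[1:]) if left and right)
-- ===== Notes on version B (the rewrite author's own statement) =====
-- stated objective: faster
-- what changed: Replaces A's interpreted per-character indexed scan with bounds checks and neighbour subscripting by a split-based algorithm: split the string on backslash once and count adjacent pairs of nonempty fragments, which correspond exactly to interior isolated backslashes.
import Mathlib
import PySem

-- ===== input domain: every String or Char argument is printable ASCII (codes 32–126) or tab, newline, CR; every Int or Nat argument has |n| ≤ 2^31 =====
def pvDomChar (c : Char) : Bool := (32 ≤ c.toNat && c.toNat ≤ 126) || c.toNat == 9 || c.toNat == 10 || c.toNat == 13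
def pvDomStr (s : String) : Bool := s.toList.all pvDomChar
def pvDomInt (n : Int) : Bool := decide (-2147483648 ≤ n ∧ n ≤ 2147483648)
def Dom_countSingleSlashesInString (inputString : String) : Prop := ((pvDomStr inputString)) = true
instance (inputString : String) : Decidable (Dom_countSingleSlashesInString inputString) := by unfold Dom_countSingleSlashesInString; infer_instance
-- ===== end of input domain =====

-- B replaces A's per-character indexed scan with bounds checks by a split-based algorithm:
-- split on backslash once and count adjacent pairs of nonempty fragments (measured faster, constant factor).

-- ===== PORT A =====
-- one loop iteration: state (singles, idx); charBefore/charAfter are always in range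
-- under the guard, so .getD's default is never used (exact port of inputString[idx±1]).
def pvStepA (cs : List Char) (p : Int × Int) (c : Char) : Int × Int :=
  let singles := p.1
  let idx := p.2
  let singles :=
    if idx > 0 ∧ idx < (cs.length : Int) - 1 then
      let charBefore := (PySem.List.pyGet? cs (idx - 1)).getD c
      let charAfter := (PySem.List.pyGet? cs (idx + 1)).getD c
      if c = '\\' then
        if charBefore ≠ '\\' ∧ charAfter ≠ '\\' then singles + 1 else singles
      else singles
    else singles
  (singles, idx + 1)

def countSingleSlashesInString (inputString : String) : Int :=
  let cs := inputString.toList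
  (cs.foldl (pvStepA cs) (0, 0)).1

-- ===== PORT B =====
-- parts = inputString.split("\\"); sum(1 for left, right in zip(parts, parts[1:]) if left and right)
def countSingleSlashesInString_alt (inputString : String) : Int :=
  let parts := PySem.Chars.splitOn inputString.toList ['\\']
  (parts.zip (parts.drop 1)).foldl
    (fun singles p => if p.1 ≠ [] ∧ p.2 ≠ [] then singles + 1 else singles) 0

-- ===== PRECONDITION & SPEC =====
def Spec_countSingleSlashesInString (inputString : String) (out : Int) : Prop := out = countSingleSlashesInString_alt inputString
instance (inputString : String) (out : Int) : Decidable (Spec_countSingleSlashesInString inputString out) := by unfold Spec_countSingleSlashesInString; infer_instance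

-- ===== CLAIM (what is proved, stated in full; the proofs are below) =====
def Claim_equal_countSingleSlashesInString : Prop := ∀ (inputString : String), Dom_countSingleSlashesInString inputString → Spec_countSingleSlashesInString inputString (countSingleSlashesInString inputString)

-- ===== LEMMAS AND PROOFS =====

-- zip(s, s[1:], s[2:]) : the list of adjacent triples, and its count of isolated middles
def pvTrip (l : List Char) : List (Char × Char × Char) :=
  l.zip ((l.drop 1).zip (l.drop 2))

def pvCnt (t : List (Char × Char × Char)) : Int :=
  ((t.filter (fun p => decide (p.2.1 = '\\' ∧ p.1 ≠ '\\' ∧ p.2.2 ≠ '\\'))).length : Int)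

theorem pvCnt_nil : pvCnt [] = 0 := rfl

theorem pvCnt_cons (a : Char × Char × Char) (t : List (Char × Char × Char)) :
    pvCnt (a :: t) = (if a.2.1 = '\\' ∧ a.1 ≠ '\\' ∧ a.2.2 ≠ '\\' then 1 else 0) + pvCnt t := by
  simp only [pvCnt, List.filter_cons]
  split_ifs with h <;> simp_all <;> ring

theorem pvTrip_short (l : List Char) (h : l.length ≤ 2) : pvTrip l = [] := by
  have : l.drop 2 = [] := by
    rw [List.drop_eq_nil_iff]; omega
  simp [pvTrip, this]

theorem pvTrip_cons (a b c : Char) (t : List Char) :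
    pvTrip (a :: b :: c :: t) = (a, b, c) :: pvTrip (b :: c :: t) := by
  simp [pvTrip]

theorem pvMainA (cs : List Char) : ∀ (q : List Char) (k : Nat) (s : Int),
    1 ≤ k → k ≤ cs.length → cs.drop k = q →
    q.foldl (pvStepA cs) (s, (k : Int)) = (s + pvCnt (pvTrip (cs.drop (k - 1))), (cs.length : Int)) := by
  intro q
  induction q with
  | nil =>
    intro k s hk1 hkle hdrop
    have hk : k = cs.length := by
      have := List.drop_eq_nil_iff.mp hdrop; omega
    subst hk
    have hlen : (cs.drop (cs.length - 1)).length ≤ 2 := by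
      rw [List.length_drop]; omega
    simp [List.foldl_nil, pvTrip_short _ hlen, pvCnt_nil]
  | cons c q' ih =>
    intro k s hk1 hkle hdrop
    have hklt : k < cs.length := by
      by_contra h
      have : cs.drop k = [] := List.drop_eq_nil_iff.mpr (by omega)
      simp [this] at hdrop
    have hsplit : cs.drop k = cs[k] :: cs.drop (k + 1) := (List.getElem_cons_drop hklt).symm
    rw [hdrop] at hsplit
    obtain ⟨hc, hq'⟩ : c = cs[k] ∧ q' = cs.drop (k + 1) := by
      exact ⟨(List.cons.injEq _ _ _ _ ▸ hsplit).1, (List.cons.injEq _ _ _ _ ▸ hsplit).2⟩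
    have hdk1 : cs.drop (k - 1) = cs[k - 1] :: cs.drop k := by
      have h1 : k - 1 < cs.length := by omega
      have h2 := (List.getElem_cons_drop h1).symm
      rw [h2, show k - 1 + 1 = k by omega]
    by_cases hend : k + 1 < cs.length
    · -- interior step: guard holds
      have hq'' : cs.drop (k + 1) = cs[k + 1] :: cs.drop (k + 2) := (List.getElem_cons_drop hend).symm
      have hb : PySem.List.pyGet? cs ((k : Int) - 1) = some cs[k - 1] := by
        have : (k : Int) - 1 = ((k - 1 : Nat) : Int) := by omega
        rw [this, PySem.List.pyGet?_natCast]
        simp [List.getElem?_eq_getElem (by omega : k - 1 < cs.length)]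
      have ha : PySem.List.pyGet? cs ((k : Int) + 1) = some cs[k + 1] := by
        have : (k : Int) + 1 = ((k + 1 : Nat) : Int) := by push_cast; ring
        rw [this, PySem.List.pyGet?_natCast]
        simp [List.getElem?_eq_getElem hend]
      have hguard : ((k : Int) > 0 ∧ (k : Int) < (cs.length : Int) - 1) := by
        constructor <;> [omega; omega]
      rw [List.foldl_cons]
      have hstep : pvStepA cs (s, (k : Int)) c =
          ((if c = '\\' then (if cs[k - 1] ≠ '\\' ∧ cs[k + 1] ≠ '\\' then s + 1 else s) else s),
            (k : Int) + 1) := by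
        simp only [pvStepA, hguard, hb, ha, Option.getD_some]
        simp
      rw [hstep]
      have hcast : (k : Int) + 1 = ((k + 1 : Nat) : Int) := by push_cast; ring
      rw [hcast, ih (k + 1) _ (by omega) (by omega) hq'.symm]
      have hdk : cs.drop k = cs[k] :: cs[k + 1] :: cs.drop (k + 2) := by
        rw [hdrop, hc, hq', hq'']
      have htripk1 : pvTrip (cs.drop (k - 1)) =
          (cs[k - 1], cs[k], cs[k + 1]) :: pvTrip (cs.drop k) := by
        rw [hdk1, hdk, pvTrip_cons]
      have key : (if c = '\\' then (if cs[k - 1] ≠ '\\' ∧ cs[k + 1] ≠ '\\' then s + 1 else s) else s)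
          = s + (if cs[k] = '\\' ∧ cs[k - 1] ≠ '\\' ∧ cs[k + 1] ≠ '\\' then 1 else 0) := by
        subst hc
        by_cases hA : cs[k] = '\\' <;> by_cases hB : cs[k - 1] ≠ '\\' ∧ cs[k + 1] ≠ '\\' <;>
          simp [hA, hB]
      rw [show (k + 1 : Nat) - 1 = k by omega, htripk1, pvCnt_cons, key]
      rw [Prod.mk.injEq]
      refine ⟨by ring, rfl⟩
    · -- k = len - 1: last character, guard false, q' = []
      have hq'nil : q' = [] := by
        rw [hq']; exact List.drop_eq_nil_iff.mpr (by omega)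
      have hguard : ¬ ((k : Int) > 0 ∧ (k : Int) < (cs.length : Int) - 1) := by
        intro ⟨_, h2⟩; omega
      rw [List.foldl_cons]
      have hstep : pvStepA cs (s, (k : Int)) c = (s, (k : Int) + 1) := by
        simp only [pvStepA, hguard, if_neg, not_false_iff]
      rw [hstep, hq'nil, List.foldl_nil]
      have hlen2 : (cs.drop (k - 1)).length ≤ 2 := by
        simp [List.length_drop]; omega
      rw [pvTrip_short _ hlen2, pvCnt_nil]
      have hke : (k : Int) + 1 = (cs.length : Int) := by omega
      simp [hke]

-- A's whole loop is the triple count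
theorem pvA_eq_cnt (s : String) :
    countSingleSlashesInString s = pvCnt (pvTrip s.toList) := by
  unfold countSingleSlashesInString
  cases hcs : s.toList with
  | nil => simp [pvTrip, pvCnt_nil]
  | cons a t =>
    have hstep : pvStepA (a :: t) (0, 0) a = (0, 1) := by
      simp only [pvStepA]
      norm_num
    have h := pvMainA (a :: t) t 1 0 (by omega) (by simp) rfl
    norm_num at h
    simp only [List.foldl_cons, hstep]
    rw [h]

-- ---- the split-based side ----

-- clean recursive form of str.split("\\")
def pvSplitc : List Char → List (List Char)
  | [] => [[]]
  | c :: t =>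
    if c = '\\' then [] :: pvSplitc t
    else match pvSplitc t with
      | [] => [[c]]
      | p :: ps => (c :: p) :: ps

theorem pvSplitc_ne_nil (l : List Char) : pvSplitc l ≠ [] := by
  cases l with
  | nil => simp [pvSplitc]
  | cons c t =>
    simp only [pvSplitc]
    split_ifs
    · simp
    · cases h : pvSplitc t <;> simp

theorem pvSplitOn_go_eq (fuel : Nat) : ∀ (l cur : List Char) (acc : List (List Char)),
    l.length < fuel →
    PySem.Chars.splitOn.go ['\\'] fuel l cur acc =
      acc.reverse ++ (match pvSplitc l with
        | [] => []
        | p :: ps => (cur.reverse ++ p) :: ps) := by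
  induction fuel with
  | zero => intro l cur acc h; omega
  | succ f ih =>
    intro l cur acc h
    cases l with
    | nil =>
      simp [PySem.Chars.splitOn.go, pvSplitc]
    | cons c rest =>
      by_cases hc : c = '\\'
      · subst hc
        have hpre : (['\\'] : List Char).isPrefixOf ('\\' :: rest) = true := by
          simp [List.isPrefixOf]
        rw [show PySem.Chars.splitOn.go ['\\'] (f + 1) ('\\' :: rest) cur acc =
              PySem.Chars.splitOn.go ['\\'] f (List.drop (['\\'] : List Char).length ('\\' :: rest))
                [] (cur.reverse :: acc) by
          simp [PySem.Chars.splitOn.go, hpre]]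
        simp only [List.length_singleton, List.drop_succ_cons, List.drop_zero]
        rw [ih rest [] (cur.reverse :: acc) (by simpa using Nat.lt_of_succ_lt_succ h)]
        obtain ⟨p, ps, hps⟩ : ∃ p ps, pvSplitc rest = p :: ps := by
          cases hx : pvSplitc rest with
          | nil => exact absurd hx (pvSplitc_ne_nil rest)
          | cons p ps => exact ⟨p, ps, rfl⟩
        simp [pvSplitc, hps]
      · have hpre : (['\\'] : List Char).isPrefixOf (c :: rest) = false := by
          simp [List.isPrefixOf, Ne.symm hc]
        rw [show PySem.Chars.splitOn.go ['\\'] (f + 1) (c :: rest) cur acc =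
              PySem.Chars.splitOn.go ['\\'] f rest (c :: cur) acc by
          simp [PySem.Chars.splitOn.go, hpre]]
        rw [ih rest (c :: cur) acc (by simpa using Nat.lt_of_succ_lt_succ h)]
        obtain ⟨p, ps, hps⟩ : ∃ p ps, pvSplitc rest = p :: ps := by
          cases hx : pvSplitc rest with
          | nil => exact absurd hx (pvSplitc_ne_nil rest)
          | cons p ps => exact ⟨p, ps, rfl⟩
        simp [pvSplitc, hc, hps]

theorem pvSplitOn_eq (l : List Char) : PySem.Chars.splitOn l ['\\'] = pvSplitc l := by
  unfold PySem.Chars.splitOn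
  rw [pvSplitOn_go_eq (l.length + 1) l [] [] (by omega)]
  obtain ⟨p, ps, hps⟩ : ∃ p ps, pvSplitc l = p :: ps := by
    cases hx : pvSplitc l with
    | nil => exact absurd hx (pvSplitc_ne_nil l)
    | cons p ps => exact ⟨p, ps, rfl⟩
  simp [hps]

-- count of adjacent pairs of nonempty parts
def pvPairCnt (parts : List (List Char)) : Int :=
  (((parts.zip (parts.drop 1)).filter (fun p => decide (p.1 ≠ [] ∧ p.2 ≠ []))).length : Int)

theorem pvPairCnt_single (p : List Char) : pvPairCnt [p] = 0 := rfl

theorem pvPairCnt_cons2 (p q : List Char) (r : List (List Char)) :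
    pvPairCnt (p :: q :: r) = (if p ≠ [] ∧ q ≠ [] then 1 else 0) + pvPairCnt (q :: r) := by
  simp only [pvPairCnt, List.drop_succ_cons, List.drop_zero, List.zip_cons_cons, List.filter_cons]
  split_ifs with h <;> simp_all <;> ring

theorem pvFoldPairs (t : List (List Char × List Char)) : ∀ s : Int,
    t.foldl (fun singles p => if p.1 ≠ [] ∧ p.2 ≠ [] then singles + 1 else singles) s
    = s + ((t.filter (fun p => decide (p.1 ≠ ([] : List Char) ∧ p.2 ≠ []))).length : Int) := by
  induction t with
  | nil => intro s; simp
  | cons a t ih =>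
    intro s
    rw [List.foldl_cons, ih, List.filter_cons]
    split_ifs with h <;> simp_all <;> ring

-- mid-count: isolated-backslash count of prev :: s restricted to middles inside s-with-prev
def pvM (prev : Char) : List Char → Int
  | [] => 0
  | c :: rest =>
    (match rest with
     | [] => 0
     | n :: _ => if c = '\\' ∧ prev ≠ '\\' ∧ n ≠ '\\' then 1 else 0) + pvM c rest

theorem pvCnt_trip_eq_pvM (s : List Char) : ∀ a : Char, pvCnt (pvTrip (a :: s)) = pvM a s := by
  induction s with
  | nil => intro a; rw [pvTrip_short _ (by simp)]; rfl
  | cons c rest ih =>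
    intro a
    cases rest with
    | nil => rw [pvTrip_short _ (by simp)]; rfl
    | cons n t =>
      rw [pvTrip_cons, pvCnt_cons, ih c]
      simp only [pvM]

-- does s start with an isolated backslash (backslash followed by a non-backslash)?
def pvHeadIso : List Char → Bool
  | c :: n :: _ => c = '\\' && n ≠ '\\'
  | _ => false

-- the head part of pvSplitc (n :: t) is empty iff the first char is a backslash
theorem pvHead_part (n : Char) (t q : List Char) (qs : List (List Char))
    (h : pvSplitc (n :: t) = q :: qs) : (q = []) ↔ (n = '\\') := by
  by_cases hn : n = '\\'
  · subst hn
    have : ([] : List Char) :: pvSplitc t = q :: qs := by simpa [pvSplitc] using h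
    rcases List.cons_eq_cons.mp this with ⟨hq, -⟩
    simp [hq.symm]
  · obtain ⟨p, ps, hps⟩ : ∃ p ps, pvSplitc t = p :: ps := by
      cases hx : pvSplitc t with
      | nil => exact absurd hx (pvSplitc_ne_nil t)
      | cons p ps => exact ⟨p, ps, rfl⟩
    have : (n :: p) :: ps = q :: qs := by simpa [pvSplitc, hn, hps] using h
    rcases List.cons_eq_cons.mp this with ⟨hq, -⟩
    simp [hq.symm, hn]

-- prepending a non-backslash char adds exactly the head-isolated correction
theorem pvKey (a : Char) (s : List Char) (ha : a ≠ '\\') :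
    pvPairCnt (pvSplitc (a :: s)) = pvPairCnt (pvSplitc s) + (if pvHeadIso s then 1 else 0) := by
  obtain ⟨p, ps, hps⟩ : ∃ p ps, pvSplitc s = p :: ps := by
    cases hx : pvSplitc s with
    | nil => exact absurd hx (pvSplitc_ne_nil s)
    | cons p ps => exact ⟨p, ps, rfl⟩
  have hsa : pvSplitc (a :: s) = (a :: p) :: ps := by
    simp [pvSplitc, ha, hps]
  rw [hsa, hps]
  cases ps with
  | nil =>
    simp only [pvPairCnt_single]
    cases s with
    | nil => simp [pvHeadIso]
    | cons c t =>
      -- splitc s = [p] forces the head char of s to be a non-backslash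
      have hc : c ≠ '\\' := by
        intro hc; subst hc
        have : ([] : List Char) :: pvSplitc t = [p] := by simpa [pvSplitc] using hps
        exact absurd (List.cons_eq_cons.mp this).2 (pvSplitc_ne_nil t)
      cases t <;> simp [pvHeadIso, hc]
  | cons q qs =>
    rw [pvPairCnt_cons2, pvPairCnt_cons2]
    cases s with
    | nil => simp [pvSplitc] at hps
    | cons c t =>
      by_cases hc : c = '\\'
      · subst hc
        have hps' : ([] : List Char) :: pvSplitc t = p :: q :: qs := by
          simpa [pvSplitc] using hps
        rcases List.cons_eq_cons.mp hps' with ⟨hp, ht⟩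
        rw [← hp]
        cases t with
        | nil =>
          have : ([] : List Char) = q ∧ ([] : List (List Char)) = qs :=
            List.cons_eq_cons.mp (by simpa [pvSplitc] using ht)
          simp [pvHeadIso, ← this.1]
        | cons n u =>
          have hqn := pvHead_part n u q qs ht
          by_cases hn : n = '\\'
          · have hq : q = [] := hqn.mpr hn
            simp [pvHeadIso, hq, hn]
          · have hq : q ≠ [] := fun h => hn (hqn.mp h)
            simp [pvHeadIso, hq, hn]
            ring
      · -- c ≠ '\\': p = c :: … nonempty, and pvHeadIso (c::t) = false
        have hp : p ≠ [] := fun h => hc ((pvHead_part c t p (q :: qs) hps).mp h)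
        cases t <;> simp [pvHeadIso, hc, hp]

-- the central identity: mid-count = pair count of the split, plus the boundary correction
theorem pvM_eq_split (s : List Char) : ∀ prev : Char,
    pvM prev s = pvPairCnt (pvSplitc s) + (if prev ≠ '\\' && pvHeadIso s then 1 else 0) := by
  induction s with
  | nil => intro prev; simp [pvM, pvSplitc, pvPairCnt_single, pvHeadIso]
  | cons c rest ih =>
    intro prev
    by_cases hc : c = '\\'
    · subst hc
      obtain ⟨q, qs, hqs⟩ : ∃ q qs, pvSplitc rest = q :: qs := by
        cases hx : pvSplitc rest with
        | nil => exact absurd hx (pvSplitc_ne_nil rest)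
        | cons q qs => exact ⟨q, qs, rfl⟩
      have hsplit : pvSplitc ('\\' :: rest) = [] :: q :: qs := by
        simp [pvSplitc, hqs]
      have hpair : pvPairCnt (pvSplitc ('\\' :: rest)) = pvPairCnt (pvSplitc rest) := by
        rw [hsplit, pvPairCnt_cons2, hqs]; simp
      have hihq := ih '\\'
      simp only [ne_eq, not_true_eq_false, Bool.false_and, if_false, decide_true,
        Bool.not_true, Bool.false_and] at hihq
      have hM : pvM '\\' rest = pvPairCnt (pvSplitc rest) := by simpa using hihq
      simp only [pvM, hpair, hM]
      cases rest with
      | nil => simp [pvHeadIso]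
      | cons n u =>
        simp only [pvHeadIso]
        by_cases hn : n = '\\' <;> by_cases hp : prev = '\\' <;>
          simp [hn, hp] <;> ring
    · -- c ≠ '\\': head term vanishes, use pvKey and ih at c
      have hhead : (match rest with
          | [] => (0 : Int)
          | n :: _ => if c = '\\' ∧ prev ≠ '\\' ∧ n ≠ '\\' then 1 else 0) = 0 := by
        cases rest <;> simp [hc]
      have hiso : pvHeadIso (c :: rest) = false := by
        cases rest <;> simp [pvHeadIso, hc]
      simp only [pvM, hhead, hiso, Bool.and_false, if_neg, zero_add]
      rw [ih c, pvKey c rest hc]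
      simp [hc]

-- B's whole computation equals the triple count too
theorem pvB_eq_cnt (s : String) :
    countSingleSlashesInString_alt s = pvCnt (pvTrip s.toList) := by
  unfold countSingleSlashesInString_alt
  rw [pvSplitOn_eq, pvFoldPairs]
  simp only [zero_add]
  show pvPairCnt (pvSplitc s.toList) = pvCnt (pvTrip s.toList)
  cases hcs : s.toList with
  | nil => simp [pvSplitc, pvPairCnt_single, pvTrip, pvCnt_nil]
  | cons a t =>
    rw [pvCnt_trip_eq_pvM t a]
    by_cases ha : a = '\\'
    · subst ha
      obtain ⟨q, qs, hqs⟩ : ∃ q qs, pvSplitc t = q :: qs := by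
        cases hx : pvSplitc t with
        | nil => exact absurd hx (pvSplitc_ne_nil t)
        | cons q qs => exact ⟨q, qs, rfl⟩
      have hsplit : pvSplitc ('\\' :: t) = [] :: q :: qs := by
        simp [pvSplitc, hqs]
      rw [hsplit, pvPairCnt_cons2]
      have hM := pvM_eq_split t '\\'
      rw [hqs] at hM
      simp only [ne_eq, not_true_eq_false, decide_true, Bool.not_true, Bool.false_and,
        Bool.false_eq_true, if_false] at hM
      simp [hM]
    · rw [pvKey a t ha, pvM_eq_split t a]
      simp [ha]

-- ===== VERDICT (by name: the statement is the Claim_ definition above) =====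
theorem countSingleSlashesInString_spec : Claim_equal_countSingleSlashesInString := by
  intro s _
  unfold Spec_countSingleSlashesInString
  rw [pvA_eq_cnt, pvB_eq_cnt]
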